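-- pv_equiv track=rewrite | github.com/hyein99/Algorithm_python_for_coding_test | Part3/ch12_구현 문제/09_문자열 압축.py | solution
-- ===== SOURCE A (Python) =====
-- def solution(s):
--     def compress(n):
--         compressed = ''
--         i = 0
--         cnt = 1
--         sub_s = ''
--         while i + n <= len(s):
--             if s[i:i + n] == sub_s:
--                 cnt += 1
--             else:
--                 if cnt > 1:
--                     compressed += str(cnt) + sub_s
--                 else:
--                     compressed += sub_s
--                 sub_s = s[i:i + n]
--                 cnt = 1
--             i += n
--         # 마지막에 처리못한 부분
--         if cnt > 1:
--             compressed += str(cnt) + sub_s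
--         else:
--             compressed += sub_s
--         # n으로 나누어떨어지지 않는 경우
--         if i < len(s):
--             compressed += s[i:]
--
--         return len(compressed)
--
--     minS = len(s)
--     for i in range(1, len(s) // 2 + 1):
--         minS = min(minS, compress(i))
--
--     return minS
-- ===== SOURCE B (Python) =====
-- def solution(s):
--     L = len(s)
--     best = L
--     for n in range(1, L // 2 + 1):
--         m = L // n  # number of full chunks
--         # chunk-unit indices where a new run begins (content changes)
--         breaks = [j for j in range(1, m) if s[j*n:(j+1)*n] != s[(j-1)*n:j*n]]
--         bounds = [0] + breaks + [m]
--         runs = [b - a for a, b in zip(bounds, bounds[1:])]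
--         total = n * len(runs) \
--             + sum(len(str(c)) for c in runs if c > 1) \
--             + (L - m * n)
--         best = min(best, total)
--     return best
-- ===== Notes on version B (the rewrite author's own statement) =====
-- stated objective: alternative
-- what changed: Replaces A's streaming run-counting state machine that materializes the compressed string via repeated string concatenation by a positional computation: for each chunk size it collects the chunk-unit indices where the content changes, derives the run lengths as differences of consecutive boundary indices, and computes the compressed length by the closed formula n*#runs + digit lengths of multi-runs + raw tail length.
import Mathlib
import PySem

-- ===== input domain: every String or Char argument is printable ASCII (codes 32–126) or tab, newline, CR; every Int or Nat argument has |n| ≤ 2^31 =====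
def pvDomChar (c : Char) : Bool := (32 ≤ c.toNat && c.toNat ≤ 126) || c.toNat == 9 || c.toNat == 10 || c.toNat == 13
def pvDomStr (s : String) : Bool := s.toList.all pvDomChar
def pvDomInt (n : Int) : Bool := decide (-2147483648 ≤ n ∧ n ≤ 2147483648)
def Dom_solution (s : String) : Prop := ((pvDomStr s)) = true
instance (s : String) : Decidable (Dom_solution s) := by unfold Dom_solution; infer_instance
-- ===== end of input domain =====

-- B replaces A's streaming string-building state machine by a positional computation:
-- run boundaries as indices, run lengths as index differences, length by closed formula.


-- ===== PORT A =====
-- A's inner while loop; the state is (i, compressed, cnt, sub_s).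
-- '0 < n' in the guard is only a termination guard: A's driver only calls n ≥ 1.
def solutionLoop (sl : List Char) (n i : Int) (compressed : List Char)
    (cnt : Int) (sub : List Char) : Int :=
  if _h : 0 < n ∧ i + n ≤ (sl.length : Int) then
    if PySem.List.slice sl (some i) (some (i + n)) = sub then
      solutionLoop sl n (i + n) compressed (cnt + 1) sub
    else
      solutionLoop sl n (i + n)
        (compressed ++ (if cnt > 1 then (PySem.Int.toStr cnt).toList ++ sub else sub))
        1 (PySem.List.slice sl (some i) (some (i + n)))
  else
    let c1 := compressed ++ (if cnt > 1 then (PySem.Int.toStr cnt).toList ++ sub else sub)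
    let c2 := if i < (sl.length : Int) then c1 ++ PySem.List.slice sl (some i) none else c1
    (c2.length : Int)
termination_by ((sl.length : Int) - i).toNat
decreasing_by all_goals omega

def solution (s : String) : Int :=
  let L := PySem.Str.len s
  (PySem.List.pyRange 1 (PySem.Int.floordiv L 2 + 1) 1).foldl
    (fun minS i => min minS (solutionLoop s.toList i 0 [] 1 [])) L

-- ===== PORT B =====
-- len(str(c))
def digitsLen (c : Int) : Int := ((PySem.Int.toStr c).toList.length : Int)

-- one chunk size: boundary indices, run lengths as differences, closed length formula
def compressAlt (sl : List Char) (n : Int) : Int :=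
  let L : Int := (sl.length : Int)
  let m := PySem.Int.floordiv L n
  let breaks := (PySem.List.pyRange 1 m 1).filter
    (fun j => PySem.List.slice sl (some (j * n)) (some ((j + 1) * n))
            ≠ PySem.List.slice sl (some ((j - 1) * n)) (some (j * n)))
  let bounds := 0 :: breaks ++ [m]
  let runs := List.zipWith (fun a b => b - a) bounds (bounds.drop 1)
  n * (runs.length : Int)
    + (runs.filter (fun c => c > 1)).foldl (fun acc c => acc + digitsLen c) 0
    + (L - m * n)

def solution_alt (s : String) : Int :=
  let L := PySem.Str.len s
  (PySem.List.pyRange 1 (PySem.Int.floordiv L 2 + 1) 1).foldl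
    (fun best n => min best (compressAlt s.toList n)) L

-- ===== PRECONDITION & SPEC =====
def Spec_solution (s : String) (out : Int) : Prop := out = solution_alt s
instance (s : String) (out : Int) : Decidable (Spec_solution s out) := by unfold Spec_solution; infer_instance

-- ===== CLAIM (what is proved, stated in full; the proofs are below) =====
def Claim_equal_solution : Prop := ∀ (s : String), Dom_solution s → Spec_solution s (solution s)

-- ===== LEMMAS AND PROOFS =====

-- proof-side abbreviation for the j-th chunk of size n
def chunkOf (sl : List Char) (n j : Int) : List Char :=
  PySem.List.slice sl (some (j * n)) (some (j * n + n))

-- proof-side: A's per-run flush length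
def contribB (ch : List Char) (cnt : Int) : Int :=
  (ch.length : Int) + (if cnt > 1 then digitsLen cnt else 0)

-- proof-side: run-length walk matching A's loop structure over a chunk list
def groupGo (cs : List (List Char)) (cur : List Char) (cnt : Int) : Int :=
  match cs with
  | [] => contribB cur cnt
  | c :: rest => if c = cur then groupGo rest cur (cnt + 1) else contribB cur cnt + groupGo rest c 1

def groupTotal (cs : List (List Char)) : Int :=
  match cs with
  | [] => 0
  | c :: rest => groupGo rest c 1

-- proof-side: list of run lengths of consecutive equal chunks
def runGo (cs : List (List Char)) (cur : List Char) (cnt : Int) : List Int :=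
  match cs with
  | [] => [cnt]
  | c :: rest => if c = cur then runGo rest cur (cnt + 1) else cnt :: runGo rest c 1

-- proof-side: consecutive differences, and adding d to the head
def diffs (l : List Int) : List Int := List.zipWith (fun a b => b - a) l (l.drop 1)
def addFirst (d : Int) (l : List Int) : List Int :=
  match l with
  | [] => []
  | x :: r => (x + d) :: r

-- range(a, b, s) with positive step, cons form
lemma pyRange_pos_cons (a b s : Int) (hs : 0 < s) (hab : a < b) :
    PySem.List.pyRange a b s = a :: PySem.List.pyRange (a + s) b s := by
  rw [PySem.List.pyRange_of_pos a b hs, PySem.List.pyRange_of_pos (a+s) b hs, if_pos hab]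
  by_cases h2 : a + s < b
  · rw [if_pos h2]
    have hk : ((b - a + s - 1) / s).toNat = ((b - (a+s) + s - 1) / s).toNat + 1 := by
      have : b - a + s - 1 = (b - (a+s) + s - 1) + 1 * s := by ring
      rw [this, Int.add_mul_ediv_right _ _ (by omega)]
      have h0 : 0 ≤ (b - (a+s) + s - 1) / s := Int.ediv_nonneg (by omega) (by omega)
      omega
    rw [hk, List.range_succ_eq_map, List.map_cons, List.map_map]
    congr 1
    · ring
    · apply List.map_congr_left; intro k _; simp; ring
  · rw [if_neg h2]
    have hk : ((b - a + s - 1) / s) = 1 := by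
      rw [← PySem.Int.floordiv_eq_ediv_of_pos hs, PySem.Int.floordiv_eq_iff_of_pos hs]
      constructor <;> omega
    rw [hk]
    simp

lemma pyRange_pos_nil (a b s : Int) (hs : 0 < s) (hab : b ≤ a) :
    PySem.List.pyRange a b s = [] := by
  rw [PySem.List.pyRange_of_pos a b hs, if_neg (by omega)]; simp

-- the length A appends when flushing a run equals contribB
lemma flush_len (sub : List Char) (cnt : Int) :
    (((if cnt > 1 then (PySem.Int.toStr cnt).toList ++ sub else sub).length : Int))
      = contribB sub cnt := by
  unfold contribB digitsLen; split_ifs <;> push_cast [List.length_append] <;> ring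

-- A's loop, once the while condition fails with no raw tail left
lemma loop_done (sl : List Char) (n i : Int) (compressed : List Char) (cnt : Int)
    (sub : List Char) (hiL : (sl.length : Int) ≤ i) (hn : 0 < n) :
    solutionLoop sl n i compressed cnt sub = (compressed.length : Int) + contribB sub cnt := by
  rw [solutionLoop, dif_neg (by omega)]
  simp only [if_neg (by omega : ¬ i < (sl.length : Int))]
  rw [← flush_len sub cnt]
  push_cast [List.length_append]
  ring

-- A's loop from state (i, compressed, cnt, sub) equals compressed's length
-- plus the group walk over the remaining chunks with current group (sub, cnt)
lemma loop_eq_go (sl : List Char) (n : Int) (hn : 0 < n) :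
    ∀ (k : Nat) (i : Int) (compressed : List Char) (cnt : Int) (sub : List Char),
      (((sl.length : Int) - i)).toNat ≤ k → 0 ≤ i →
      (sub = [] ∨ (sub.length : Int) = n) →
      solutionLoop sl n i compressed cnt sub
        = (compressed.length : Int) +
          groupGo ((PySem.List.pyRange i (sl.length : Int) n).map
            (fun j => PySem.List.slice sl (some j) (some (j + n)))) sub cnt := by
  intro k
  induction k with
  | zero =>
    intro i compressed cnt sub hk hi hsub
    rw [loop_done sl n i compressed cnt sub (by omega) hn,
        pyRange_pos_nil _ _ _ hn (by omega)]
    simp [groupGo]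
  | succ k ih =>
    intro i compressed cnt sub hk hi hsub
    by_cases hle : i + n ≤ (sl.length : Int)
    · have hiL : i < (sl.length : Int) := by omega
      rw [pyRange_pos_cons i _ n hn hiL, List.map_cons]
      have hclen : (((PySem.List.slice sl (some i) (some (i + n))).length : Int)) = n := by
        rw [PySem.List.slice_toNat sl (by omega) (by omega)]
        simp only [List.length_take, List.length_drop]
        omega
      rw [solutionLoop, dif_pos ⟨hn, hle⟩]
      by_cases hceq : PySem.List.slice sl (some i) (some (i + n)) = sub
      · rw [if_pos hceq, ih (i + n) compressed (cnt + 1) sub (by omega) (by omega) hsub]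
        simp only [groupGo, if_pos hceq]
      · rw [if_neg hceq,
            ih (i + n) _ 1 _ (by omega) (by omega) (Or.inr hclen)]
        simp only [groupGo, if_neg hceq]
        rw [← flush_len sub cnt]
        push_cast [List.length_append]
        ring
    · by_cases hiL : i < (sl.length : Int)
      · rw [pyRange_pos_cons i _ n hn hiL, pyRange_pos_nil _ _ _ hn (by omega),
            List.map_cons, List.map_nil]
        have ht : PySem.List.slice sl (some i) (some (i + n)) = sl.drop i.toNat := by
          rw [PySem.List.slice_toNat sl (by omega) (by omega)]
          apply List.take_of_length_le
          simp only [List.length_drop]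
          omega
        have htlen : (((PySem.List.slice sl (some i) (some (i + n))).length : Int))
            = (sl.length : Int) - i := by
          rw [ht]; simp only [List.length_drop]; omega
        have htne : PySem.List.slice sl (some i) (some (i + n)) ≠ sub := by
          rcases hsub with h0 | hlen
          · intro hc; rw [hc, h0] at htlen; simp at htlen; omega
          · intro hc; rw [hc, hlen] at htlen; omega
        rw [solutionLoop, dif_neg (by omega)]
        simp only [if_pos hiL, groupGo, if_neg htne]
        rw [PySem.List.slice_from sl (by omega : (0:Int) ≤ i), ← flush_len sub cnt]
        simp only [contribB, digitsLen, if_neg (by omega : ¬ (1:Int) > 1)]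
        push_cast [List.length_append, List.length_drop]
        omega
      · rw [loop_done sl n i compressed cnt sub (by omega) hn,
            pyRange_pos_nil _ _ _ hn (by omega)]
        simp [groupGo]

-- a full chunk has length n
lemma chunk_len (sl : List Char) (n j : Int) (hj : 0 ≤ j) (hn : 0 < n)
    (hle : j * n + n ≤ (sl.length : Int)) :
    ((chunkOf sl n j).length : Int) = n := by
  have hjn : 0 ≤ j * n := by positivity
  unfold chunkOf
  rw [PySem.List.slice_toNat sl (by omega) (by omega)]
  simp only [List.length_take, List.length_drop]
  omega

-- the index range 0,n,2n,… below L splits into full-chunk indices and the tail index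
lemma range_split (sl : List Char) (n : Int) (hn : 0 < n) :
    ∀ (k : Nat) (a : Int),
      ((PySem.Int.floordiv (sl.length : Int) n) - a).toNat ≤ k → 0 ≤ a →
      a ≤ PySem.Int.floordiv (sl.length : Int) n →
      PySem.List.pyRange (a * n) (sl.length : Int) n
        = (PySem.List.pyRange a (PySem.Int.floordiv (sl.length : Int) n) 1).map (· * n)
          ++ (if (PySem.Int.floordiv (sl.length : Int) n) * n < (sl.length : Int)
              then [(PySem.Int.floordiv (sl.length : Int) n) * n] else []) := by
  intro k
  set L : Int := (sl.length : Int) with hL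
  set m : Int := PySem.Int.floordiv L n with hm
  have hmn : m * n ≤ L ∧ L < m * n + n := by
    rw [hm, PySem.Int.floordiv_eq_ediv_of_pos hn]
    refine ⟨Int.ediv_mul_le L (by omega), ?_⟩
    nlinarith [Int.lt_ediv_add_one_mul_self L hn]
  induction k with
  | zero =>
    intro a hk ha ham
    have haeq : a = m := by omega
    rw [haeq, pyRange_pos_nil m m 1 (by omega) (by omega)]
    simp only [List.map_nil, List.nil_append]
    by_cases ht : m * n < L
    · rw [if_pos ht, pyRange_pos_cons _ _ _ hn ht, pyRange_pos_nil _ _ _ hn (by omega)]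
    · rw [if_neg ht, pyRange_pos_nil _ _ _ hn (by omega)]
  | succ k ih =>
    intro a hk ha ham
    by_cases haeq : a = m
    · exact ih a (by omega) ha ham
    · have halt : a < m := by omega
      have h1 : a * n < L := by nlinarith
      rw [pyRange_pos_cons (a * n) L n hn h1, pyRange_pos_cons a m 1 (by omega) halt,
          List.map_cons, List.cons_append]
      have he : a * n + n = (a + 1) * n := by ring
      rw [he, ih (a + 1) (by omega) (by omega) (by omega)]

-- run walk over equal-length chunks: total length as closed sum over run lengths
lemma groupGo_eq_sum (n : Int) :
    ∀ (cs : List (List Char)) (cur : List Char) (cnt : Int),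
      (∀ c ∈ cs, ((c.length : Int)) = n) → ((cur.length : Int)) = n →
      groupGo cs cur cnt
        = ((runGo cs cur cnt).map (fun c => n + if c > 1 then digitsLen c else 0)).sum := by
  intro cs
  induction cs with
  | nil =>
    intro cur cnt _ hcur
    simp [groupGo, runGo, contribB, hcur]
  | cons c rest ih =>
    intro cur cnt hall hcur
    by_cases hc : c = cur
    · simp only [groupGo, runGo, if_pos hc]
      exact ih cur (cnt + 1) (fun x hx => hall x (List.mem_cons_of_mem _ hx)) hcur
    · simp only [groupGo, runGo, if_neg hc, List.map_cons, List.sum_cons]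
      rw [ih c 1 (fun x hx => hall x (List.mem_cons_of_mem _ hx))
            (hall c List.mem_cons_self)]
      simp [contribB, hcur]

-- appending a tail chunk of a different length adds exactly its raw length
lemma groupGo_tail (n : Int) (t : List Char) (htn : ((t.length : Int)) ≠ n) :
    ∀ (cs : List (List Char)) (cur : List Char) (cnt : Int),
      (∀ c ∈ cs, ((c.length : Int)) = n) → ((cur.length : Int)) = n →
      groupGo (cs ++ [t]) cur cnt = groupGo cs cur cnt + (t.length : Int) := by
  intro cs
  induction cs with
  | nil =>
    intro cur cnt _ hcur
    have hne : t ≠ cur := by intro h; rw [h, hcur] at htn; exact htn rfl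
    simp only [List.nil_append, groupGo, if_neg hne, contribB,
      if_neg (by omega : ¬ (1:Int) > 1)]
    ring
  | cons c rest ih =>
    intro cur cnt hall hcur
    by_cases hc : c = cur
    · simp only [List.cons_append, groupGo, if_pos hc]
      exact ih cur (cnt + 1) (fun x hx => hall x (List.mem_cons_of_mem _ hx)) hcur
    · simp only [List.cons_append, groupGo, if_neg hc]
      rw [ih c 1 (fun x hx => hall x (List.mem_cons_of_mem _ hx)) (hall c List.mem_cons_self)]
      ring

lemma addFirst_zero (l : List Int) : addFirst 0 l = l := by
  cases l <;> simp [addFirst]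

-- run lengths = differences of consecutive boundary indices
lemma runGo_eq_diffs (sl : List Char) (n m : Int) :
    ∀ (k : Nat) (a cnt : Int), (m - a).toNat ≤ k → 1 ≤ a → a ≤ m →
      runGo ((PySem.List.pyRange a m 1).map (chunkOf sl n)) (chunkOf sl n (a - 1)) cnt
        = addFirst (cnt - 1)
            (diffs ((a - 1) :: ((PySem.List.pyRange a m 1).filter
              (fun j => chunkOf sl n j ≠ chunkOf sl n (j - 1))) ++ [m])) := by
  intro k
  induction k with
  | zero =>
    intro a cnt hk ha ham
    have haeq : a = m := by omega
    subst haeq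
    rw [pyRange_pos_nil a a 1 (by omega) (by omega)]
    simp [runGo, diffs, addFirst]
  | succ k ih =>
    intro a cnt hk ha ham
    by_cases haeq : a = m
    · exact ih a cnt (by omega) ha ham
    · have halt : a < m := by omega
      rw [pyRange_pos_cons a m 1 (by omega) halt, List.map_cons, List.filter_cons]
      have hIH := ih (a + 1) (if chunkOf sl n a = chunkOf sl n (a - 1) then cnt + 1 else 1)
        (by omega) (by omega) (by omega)
      rw [show a + 1 - 1 = a from by ring] at hIH
      by_cases hbr : chunkOf sl n a = chunkOf sl n (a - 1)
      · rw [if_pos hbr] at hIH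
        rw [hbr] at hIH
        have hd : (decide (chunkOf sl n a ≠ chunkOf sl n (a - 1))) = false := by simp [hbr]
        rw [hd]
        simp only [Bool.false_eq_true, if_false, runGo, if_pos hbr]
        rw [hIH]
        rcases ((PySem.List.pyRange (a+1) m 1).filter
            (fun j => chunkOf sl n j ≠ chunkOf sl n (j - 1))) with _ | ⟨x, r⟩
        · simp only [List.singleton_append, diffs, List.drop_succ_cons,
            List.drop_zero, List.zipWith_cons_cons, List.zipWith_nil_right, addFirst]
          congr 1
          ring
        · simp only [List.cons_append, diffs, List.drop_succ_cons, List.drop_zero,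
            List.zipWith_cons_cons, addFirst]
          congr 1
          ring
      · rw [if_neg hbr] at hIH
        rw [show (1:Int) - 1 = 0 from by ring] at hIH
        have hd : (decide (chunkOf sl n a ≠ chunkOf sl n (a - 1))) = true := by simp [hbr]
        rw [hd]
        simp only [if_true, runGo, if_neg hbr]
        rw [hIH, addFirst_zero]
        rcases ((PySem.List.pyRange (a+1) m 1).filter
            (fun j => chunkOf sl n j ≠ chunkOf sl n (j - 1))) with _ | ⟨x, r⟩
        · simp only [List.cons_append, List.nil_append, diffs,
            List.drop_succ_cons, List.drop_zero, List.zipWith_cons_cons,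
            List.zipWith_nil_right, addFirst]
          congr 1
          ring
        · simp only [List.cons_append, diffs, List.drop_succ_cons, List.drop_zero,
            List.zipWith_cons_cons, addFirst]
          congr 1
          ring
  
-- foldl accumulation of digit lengths is the sum of the mapped list
lemma foldl_digits (l : List Int) : ∀ x : Int,
    l.foldl (fun acc c => acc + digitsLen c) x = x + (l.map digitsLen).sum := by
  induction l with
  | nil => intro x; simp
  | cons c r ih => intro x; simp only [List.foldl_cons, List.map_cons, List.sum_cons, ih]; ring

-- sum of per-run contributions = n * #runs + digit lengths of multi-runs
lemma sum_contrib (n : Int) (l : List Int) :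
    ((l.map (fun c => n + if c > 1 then digitsLen c else 0)).sum)
      = n * (l.length : Int)
        + (l.filter (fun c => c > 1)).foldl (fun acc c => acc + digitsLen c) 0 := by
  induction l with
  | nil => simp
  | cons c r ih =>
    simp only [List.map_cons, List.sum_cons, List.filter_cons, ih]
    by_cases hc : c > 1
    · rw [if_pos hc, if_pos (by simpa using hc)]
      rw [List.foldl_cons, foldl_digits, foldl_digits]
      push_cast [List.length_cons]
      ring
    · rw [if_neg hc, if_neg (by simpa using hc)]
      push_cast [List.length_cons]
      ring

-- per chunk size: A's loop equals B's closed formula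
lemma compress_eq (sl : List Char) (n : Int) (hn : 0 < n)
    (hnL : n ≤ (sl.length : Int)) :
    solutionLoop sl n 0 [] 1 [] = compressAlt sl n := by
  set L : Int := (sl.length : Int) with hLdef
  set m : Int := PySem.Int.floordiv L n with hm
  have hmn : m * n ≤ L ∧ L < m * n + n := by
    rw [hm, PySem.Int.floordiv_eq_ediv_of_pos hn]
    refine ⟨Int.ediv_mul_le L (by omega), ?_⟩
    nlinarith [Int.lt_ediv_add_one_mul_self L hn]
  have hm1 : 1 ≤ m := by nlinarith [hmn.1, hmn.2]
  have hc0eq : PySem.List.slice sl (some 0) (some (0 + n)) = chunkOf sl n 0 := by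
    unfold chunkOf; norm_num
  -- A's loop = group walk over the full chunks (+ raw tail when n does not divide L)
  have hA : solutionLoop sl n 0 [] 1 []
      = groupTotal ((PySem.List.pyRange 0 L n).map
          (fun i => PySem.List.slice sl (some i) (some (i + n)))) := by
    rw [loop_eq_go sl n hn (L - 0).toNat 0 [] 1 [] (by omega) (by omega) (Or.inl rfl)]
    have hL0 : (0:Int) < L := by omega
    rw [pyRange_pos_cons 0 L n hn hL0, List.map_cons, groupTotal]
    have hc0 : PySem.List.slice sl (some 0) (some (0 + n)) ≠ [] := by
      rw [hc0eq]
      have := chunk_len sl n 0 le_rfl hn (by omega)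
      intro hcon; rw [hcon] at this; simp at this; omega
    rw [groupGo, if_neg hc0]
    simp [contribB]
  have hsplit : PySem.List.pyRange 0 L n
      = (PySem.List.pyRange 0 m 1).map (· * n)
        ++ (if m * n < L then [m * n] else []) := by
    have h := range_split sl n hn (m - 0).toNat 0
      (by rw [← hLdef, ← hm]) (by omega) (by rw [← hLdef, ← hm]; omega)
    rw [← hLdef, ← hm] at h
    simpa using h
  have hmapeq : ((PySem.List.pyRange 0 m 1).map (· * n)).map
        (fun i => PySem.List.slice sl (some i) (some (i + n)))
      = (PySem.List.pyRange 0 m 1).map (chunkOf sl n) := by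
    rw [List.map_map]
    apply List.map_congr_left
    intro j _
    simp [chunkOf, Function.comp]
  have hr01 : PySem.List.pyRange 0 m 1 = 0 :: PySem.List.pyRange 1 m 1 := by
    have := pyRange_pos_cons 0 m 1 (by omega) (by omega)
    simpa using this
  -- every full chunk has length n
  have hall : ∀ c ∈ (PySem.List.pyRange 1 m 1).map (chunkOf sl n), ((c.length : Int)) = n := by
    intro c hc
    obtain ⟨j, hj, rfl⟩ := List.mem_map.mp hc
    rw [PySem.List.mem_pyRange_one] at hj
    exact chunk_len sl n j (by omega) hn (by nlinarith [hj.1, hj.2, hmn.1])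
  have hc0len : ((chunkOf sl n 0).length : Int) = n := chunk_len sl n 0 le_rfl hn (by omega)
  -- the breaks list of B is the chunkOf-based breaks list
  have hbrk : (PySem.List.pyRange 1 m 1).filter
        (fun j => PySem.List.slice sl (some (j * n)) (some ((j + 1) * n))
                ≠ PySem.List.slice sl (some ((j - 1) * n)) (some (j * n)))
      = (PySem.List.pyRange 1 m 1).filter
        (fun j => chunkOf sl n j ≠ chunkOf sl n (j - 1)) := by
    apply List.filter_congr
    intro j _
    have e1 : PySem.List.slice sl (some (j * n)) (some ((j + 1) * n)) = chunkOf sl n j := by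
      unfold chunkOf
      rw [show (j + 1) * n = j * n + n from by ring]
    have e2 : PySem.List.slice sl (some ((j - 1) * n)) (some (j * n))
        = chunkOf sl n (j - 1) := by
      unfold chunkOf
      rw [show j * n = (j - 1) * n + n from by ring]
    simp only [e1, e2]
  -- the core: group walk over full chunks = n * #runs + digit lengths over the diffs list
  have hcore : groupGo ((PySem.List.pyRange 1 m 1).map (chunkOf sl n)) (chunkOf sl n 0) 1
      = n * (((diffs (0 :: ((PySem.List.pyRange 1 m 1).filter
            (fun j => chunkOf sl n j ≠ chunkOf sl n (j - 1))) ++ [m])).length : Int))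
        + ((diffs (0 :: ((PySem.List.pyRange 1 m 1).filter
            (fun j => chunkOf sl n j ≠ chunkOf sl n (j - 1))) ++ [m])).filter
              (fun c => c > 1)).foldl (fun acc c => acc + digitsLen c) 0 := by
    rw [groupGo_eq_sum n _ _ 1 hall hc0len]
    have hr := runGo_eq_diffs sl n m (m - 1).toNat 1 1 (by omega) le_rfl hm1
    rw [show (1:Int) - 1 = 0 from by ring] at hr
    rw [hr, addFirst_zero, sum_contrib]
  -- assemble, by cases on whether a raw tail exists
  rw [hA, hsplit, List.map_append, hmapeq, hr01, List.map_cons]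
  by_cases ht : m * n < L
  · rw [if_pos ht]
    simp only [List.map_cons, List.map_nil]
    have htlen : (((PySem.List.slice sl (some (m * n)) (some (m * n + n))).length : Int))
        = L - m * n := by
      have hmn0 : 0 ≤ m * n := by positivity
      rw [PySem.List.slice_toNat sl (by omega) (by omega)]
      simp only [List.length_take, List.length_drop]
      omega
    rw [List.cons_append, groupTotal, groupGo_tail n _ (by omega) _ _ 1 hall hc0len]
    rw [hcore, htlen]
    simp only [compressAlt, diffs, hbrk, ← hm, ← hLdef]
  · rw [if_neg ht]
    simp only [List.map_nil, List.append_nil, groupTotal]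
    rw [hcore]
    have hLeq : L - m * n = 0 := by omega
    simp only [compressAlt, diffs, hbrk, ← hm, ← hLdef, hLeq]
    ring

-- ===== VERDICT (by name: the statement is the Claim_ definition above) =====
theorem solution_spec : Claim_equal_solution := by
  intro s _
  unfold Spec_solution solution solution_alt
  refine PySem.List.foldl_congr_mem _ _ _ _ ?_
  intro acc x hx
  rw [PySem.List.mem_pyRange_one] at hx
  obtain ⟨h1, h2⟩ := hx
  rw [PySem.Int.floordiv_eq_ediv_of_pos (by norm_num), PySem.Str.len_eq] at h2
  have hx2 : x ≤ (s.toList.length : Int) := by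
    have := Int.ediv_le_self (s.toList.length : Int) (by norm_num : (0:Int) ≤ 2)
    omega
  rw [compress_eq s.toList x (by omega) hx2]
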